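-- pv_equiv track=rewrite | github.com/qinetique/HackerRank-Interview-Preparation-Kit | InterviewPreparation/Recursion and Backtracking/Recursion: Davis' Staircase.py | stepPerms
-- ===== SOURCE A (Python) =====
-- def stepPerms(n):
--     module_value = 10**10 + 7
--     v = [0] * max(3, n + 1)
--     v[0] = 1
--     v[1] = 1
--     v[2] = v[1] + v[0]
--     for i in range(3, n + 1):
--         v[i] = (v[i - 1] + v[i - 2] + v[i - 3]) % module_value
--     return v[n]
-- ===== SOURCE B (Python) =====
-- def stepPerms(n):
--     MOD = 10**10 + 7
--     base = [1, 1, 2]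
--     if n <= 2:
--         return base[n]
--
--     def mul(A, B):
--         return tuple(
--             tuple(sum(A[i][k] * B[k][j] for k in range(3)) % MOD for j in range(3))
--             for i in range(3)
--         )
--
--     T = ((1, 1, 1), (1, 0, 0), (0, 1, 0))
--     R = ((1, 0, 0), (0, 1, 0), (0, 0, 1))
--     e = n - 2
--     while e:
--         if e & 1:
--             R = mul(R, T)
--         T = mul(T, T)
--         e >>= 1
--     return (2 * R[0][0] + R[0][1] + R[0][2]) % MOD
-- ===== Notes on version B (the rewrite author's own statement) =====
-- stated objective: faster
-- what changed: Replaces A's O(n) dynamic-programming list with square-and-multiply exponentiation of the 3x3 tribonacci transition matrix modulo 10^10+7, plus a 3-entry lookup table for n <= 2.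
import Mathlib
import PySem

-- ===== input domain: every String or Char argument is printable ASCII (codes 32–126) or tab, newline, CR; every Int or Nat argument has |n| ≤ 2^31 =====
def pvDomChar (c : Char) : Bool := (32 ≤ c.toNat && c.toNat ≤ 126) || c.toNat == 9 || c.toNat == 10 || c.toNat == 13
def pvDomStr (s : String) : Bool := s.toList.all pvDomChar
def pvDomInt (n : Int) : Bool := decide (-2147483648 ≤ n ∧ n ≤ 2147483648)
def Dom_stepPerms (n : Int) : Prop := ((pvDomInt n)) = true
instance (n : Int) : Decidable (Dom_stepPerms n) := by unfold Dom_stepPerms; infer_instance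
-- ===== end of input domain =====

-- B replaces A's O(n) dynamic-programming list with exponentiation by squaring of the
-- 3x3 tribonacci transition matrix modulo 10^10+7 (O(log n) steps): measurably faster.

-- ===== PORT A =====
-- Python list indexing on an Array: v[i] with negative i counted from the end.
-- Exact for in-range indices (-size ≤ i < size); out-of-range (Python IndexError) is
-- excluded by Pre_ (read returns 0, store is a no-op there).
def pvAGet (v : Array Int) (i : Int) : Int :=
  let j := if i < 0 then i + v.size else i
  (v[j.toNat]?).getD 0

def pvASet (v : Array Int) (i : Int) (x : Int) : Array Int :=
  let j := if i < 0 then i + v.size else i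
  v.setIfInBounds j.toNat x

-- literal transliteration of A: build the list v, fill v[0..2], loop i in range(3, n+1), return v[n]
def stepPerms (n : Int) : Int :=
  let module_value : Int := 10 ^ 10 + 7
  let v : Array Int := Array.replicate (max 3 (n + 1)).toNat 0
  let v := pvASet v 0 1
  let v := pvASet v 1 1
  let v := pvASet v 2 (pvAGet v 1 + pvAGet v 0)
  let v := (PySem.List.pyRange 3 (n + 1) 1).foldl
    (fun v i =>
      pvASet v i
        (PySem.Int.mod (pvAGet v (i - 1) + pvAGet v (i - 2) + pvAGet v (i - 3)) module_value))
    v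
  pvAGet v n

-- ===== PORT B =====
-- 3x3 matrix of Ints, as Python's tuple of row tuples
def pvMat3 : Type := (Int × Int × Int) × (Int × Int × Int) × (Int × Int × Int)

-- Source B's mul: entrywise 3x3 product with each entry reduced mod MOD
def pvMul (A B : pvMat3) (MOD : Int) : pvMat3 :=
  ((PySem.Int.mod (A.1.1 * B.1.1 + A.1.2.1 * B.2.1.1 + A.1.2.2 * B.2.2.1) MOD,
    PySem.Int.mod (A.1.1 * B.1.2.1 + A.1.2.1 * B.2.1.2.1 + A.1.2.2 * B.2.2.2.1) MOD,
    PySem.Int.mod (A.1.1 * B.1.2.2 + A.1.2.1 * B.2.1.2.2 + A.1.2.2 * B.2.2.2.2) MOD),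
   (PySem.Int.mod (A.2.1.1 * B.1.1 + A.2.1.2.1 * B.2.1.1 + A.2.1.2.2 * B.2.2.1) MOD,
    PySem.Int.mod (A.2.1.1 * B.1.2.1 + A.2.1.2.1 * B.2.1.2.1 + A.2.1.2.2 * B.2.2.2.1) MOD,
    PySem.Int.mod (A.2.1.1 * B.1.2.2 + A.2.1.2.1 * B.2.1.2.2 + A.2.1.2.2 * B.2.2.2.2) MOD),
   (PySem.Int.mod (A.2.2.1 * B.1.1 + A.2.2.2.1 * B.2.1.1 + A.2.2.2.2 * B.2.2.1) MOD,
    PySem.Int.mod (A.2.2.1 * B.1.2.1 + A.2.2.2.1 * B.2.1.2.1 + A.2.2.2.2 * B.2.2.2.1) MOD,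
    PySem.Int.mod (A.2.2.1 * B.1.2.2 + A.2.2.2.1 * B.2.1.2.2 + A.2.2.2.2 * B.2.2.2.2) MOD))

-- Source B's 'while e:' square-and-multiply loop, recursion on the (nonnegative) exponent
def pvPowLoop (e : Nat) (R T : pvMat3) (MOD : Int) : pvMat3 :=
  if h : e = 0 then R
  else pvPowLoop (e / 2) (if e % 2 = 1 then pvMul R T MOD else R) (pvMul T T MOD) MOD
termination_by e
decreasing_by exact Nat.div_lt_self (Nat.pos_of_ne_zero h) (by omega)

def stepPerms_alt (n : Int) : Int :=
  let MOD : Int := 10 ^ 10 + 7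
  let base : List Int := [1, 1, 2]
  if n ≤ 2 then PySem.List.pyGetD base n 0
  else
    let T : pvMat3 := ((1, 1, 1), (1, 0, 0), (0, 1, 0))
    let R : pvMat3 := ((1, 0, 0), (0, 1, 0), (0, 0, 1))
    let R := pvPowLoop (n - 2).toNat R T MOD
    PySem.Int.mod (2 * R.1.1 + R.1.2.1 + R.1.2.2) MOD

-- ===== PRECONDITION & SPEC =====
-- Pre_ excludes exactly n ≤ -4, where A raises IndexError (v[n] out of range); B raises there too.
def Pre_stepPerms (n : Int) : Prop := -3 ≤ n
instance (n : Int) : Decidable (Pre_stepPerms n) := by unfold Pre_stepPerms; infer_instance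
def pvWitness_stepPerms : Int := 5

def Spec_stepPerms (n : Int) (out : Int) : Prop := out = stepPerms_alt n
instance (n : Int) (out : Int) : Decidable (Spec_stepPerms n out) := by unfold Spec_stepPerms; infer_instance

-- ===== CLAIM (what is proved, stated in full; the proofs are below) =====
def Claim_equal_stepPerms : Prop := ∀ (n : Int), Dom_stepPerms n → Pre_stepPerms n → Spec_stepPerms n (stepPerms n)

-- ===== LEMMAS AND PROOFS =====

def pvMOD : Int := 10 ^ 10 + 7

def pvNN : Nat := 10000000007

-- the recurrence both programs compute: tribonacci with each step reduced mod 10^10+7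
def pvT : Nat → Int
  | 0 => 1
  | 1 => 1
  | 2 => 2
  | k + 3 => (pvT (k + 2) + pvT (k + 1) + pvT k) % pvMOD

lemma pvMOD_pos : (0 : Int) < pvMOD := by norm_num [pvMOD]

lemma pvMOD_eq_NN : pvMOD = ((pvNN : Nat) : Int) := by norm_num [pvMOD, pvNN]

lemma pvT_nonneg (k : Nat) : 0 ≤ pvT k := by
  match k with
  | 0 | 1 | 2 => simp [pvT]
  | k + 3 => exact Int.emod_nonneg _ (by norm_num [pvMOD])

lemma pvT_lt (k : Nat) : pvT k < pvMOD := by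
  match k with
  | 0 | 1 | 2 => norm_num [pvT, pvMOD]
  | k + 3 => exact Int.emod_lt_of_pos _ pvMOD_pos

-- ---------- A-side: the DP loop computes pvT ----------

lemma pvAGet_natCast (v : Array Int) (k : Nat) : pvAGet v (k : Int) = (v[k]?).getD 0 := by
  unfold pvAGet
  rw [if_neg (by omega)]
  simp

lemma pvASet_natCast (v : Array Int) (k : Nat) (x : Int) :
    pvASet v (k : Int) x = v.setIfInBounds k x := by
  unfold pvASet
  rw [if_neg (by omega)]
  simp

def pvF (v : Array Int) (i : Int) : Array Int :=
  pvASet v i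
    (PySem.Int.mod (pvAGet v (i - 1) + pvAGet v (i - 2) + pvAGet v (i - 3)) pvMOD)

def pvV0 (len : Nat) : Array Int :=
  pvASet (pvASet (pvASet (Array.replicate len 0) 0 1) 1 1) 2
    (pvAGet (pvASet (pvASet (Array.replicate len 0) 0 1) 1 1) 1 +
      pvAGet (pvASet (pvASet (Array.replicate len 0) 0 1) 1 1) 0)

lemma pvV0_spec (len : Nat) (hlen : 3 ≤ len) :
    (pvV0 len).size = len ∧ ∀ k : Nat, k < 3 → (pvV0 len)[k]? = some (pvT k) := by
  have l0 : 0 < len := by omega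
  have l1 : 1 < len := by omega
  have l2 : 2 < len := by omega
  constructor
  · simp [pvV0, pvASet]
  · intro k hk
    interval_cases k <;>
      norm_num [pvV0, pvASet, pvAGet, pvT, Array.getElem?_setIfInBounds,
        Array.getElem?_replicate, Array.getElem_setIfInBounds, Array.getElem_replicate,
        show Int.toNat 2 = 2 from rfl, l0, l1, l2]

lemma pvA_loop (len : Nat) (m : Nat) (hm : 3 + m ≤ len) (hlen : 3 ≤ len) :
    ((PySem.List.pyRange 3 (3 + (m : Int)) 1).foldl pvF (pvV0 len)).size = len ∧
    ∀ k : Nat, k < 3 + m →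
      ((PySem.List.pyRange 3 (3 + (m : Int)) 1).foldl pvF (pvV0 len))[k]? = some (pvT k) := by
  induction m with
  | zero =>
    have : PySem.List.pyRange 3 (3 + (0 : Int)) 1 = [] := by
      rw [PySem.List.pyRange_one_eq_nil (by omega)]
    simpa [this] using pvV0_spec len hlen
  | succ m ih =>
    obtain ⟨ihlen, ihget⟩ := ih (by omega)
    set w := (PySem.List.pyRange 3 (3 + (m : Int)) 1).foldl pvF (pvV0 len) with hw
    have hsplit : PySem.List.pyRange 3 (3 + ((m + 1 : Nat) : Int)) 1 =
        PySem.List.pyRange 3 (3 + (m : Int)) 1 ++ [3 + (m : Int)] := by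
      have : (3 + ((m + 1 : Nat) : Int)) = (3 + (m : Int)) + 1 := by push_cast; ring
      rw [this, PySem.List.pyRange_one_succ_right (by omega)]
    rw [hsplit, List.foldl_append]
    simp only [List.foldl_cons, List.foldl_nil]
    have hget : ∀ j : Nat, j < 3 + m → pvAGet w ((j : Nat) : Int) = pvT j := by
      intro j hj
      rw [pvAGet_natCast, ihget j hj]
      rfl
    have e1 : (3 + (m : Int)) - 1 = ((m + 2 : Nat) : Int) := by push_cast; ring
    have e2 : (3 + (m : Int)) - 2 = ((m + 1 : Nat) : Int) := by push_cast; ring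
    have e3 : (3 + (m : Int)) - 3 = ((m : Nat) : Int) := by push_cast; ring
    have e0 : (3 + (m : Int)) = ((m + 3 : Nat) : Int) := by push_cast; ring
    have hval : pvF w (3 + (m : Int)) = w.setIfInBounds (m + 3) (pvT (m + 3)) := by
      unfold pvF
      rw [e1, e2, e3, hget (m + 2) (by omega), hget (m + 1) (by omega), hget m (by omega)]
      rw [e0, pvASet_natCast]
      rw [PySem.Int.mod_eq_emod_of_pos pvMOD_pos]
      rfl
    rw [hval]
    refine ⟨by simpa using ihlen, ?_⟩
    intro k hk
    rw [Array.getElem?_setIfInBounds]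
    by_cases hkm : m + 3 = k
    · subst hkm
      simp [ihlen, Nat.lt_of_lt_of_le (by omega : m + 3 < 3 + (m+1)) hm]
    · simp only [hkm, if_false]
      exact ihget k (by omega)

lemma stepPerms_eq_pvT (n : Int) (hn : 3 ≤ n) : stepPerms n = pvT n.toNat := by
  unfold stepPerms
  have hmax : (max 3 (n + 1)).toNat = (n + 1).toNat := by omega
  rw [hmax]
  set len := (n + 1).toNat with hlendef
  have hlen3 : 3 ≤ len := by omega
  have hform : (3 + (((n - 2).toNat : Nat) : Int)) = n + 1 := by omega
  have hmain := pvA_loop len (n - 2).toNat (by omega) hlen3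
  rw [hform] at hmain
  obtain ⟨hL, hG⟩ := hmain
  show pvAGet ((PySem.List.pyRange 3 (n + 1) 1).foldl _ _) n = pvT n.toNat
  have hfold : ((PySem.List.pyRange 3 (n + 1) 1).foldl
      (fun v i =>
        pvASet v i
          (PySem.Int.mod (pvAGet v (i - 1) + pvAGet v (i - 2) + pvAGet v (i - 3))
            (10 ^ 10 + 7)))
      (pvASet (pvASet (pvASet (Array.replicate len 0) 0 1) 1 1) 2
        (pvAGet (pvASet (pvASet (Array.replicate len 0) 0 1) 1 1) 1 +
          pvAGet (pvASet (pvASet (Array.replicate len 0) 0 1) 1 1) 0))) =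
      ((PySem.List.pyRange 3 (n + 1) 1).foldl pvF (pvV0 len)) := by
    rfl
  rw [hfold]
  have hGn := hG n.toNat (by omega)
  unfold pvAGet
  rw [if_neg (by omega)]
  show ((((PySem.List.pyRange 3 (n + 1) 1).foldl pvF (pvV0 len))[n.toNat]?).getD 0) = pvT n.toNat
  rw [hGn]
  rfl

-- ---------- B-side: the matrix loop computes pvT ----------

def pvCast (A : pvMat3) : Matrix (Fin 3) (Fin 3) (ZMod pvNN) :=
  !![(A.1.1 : ZMod pvNN), (A.1.2.1 : ZMod pvNN), (A.1.2.2 : ZMod pvNN);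
     (A.2.1.1 : ZMod pvNN), (A.2.1.2.1 : ZMod pvNN), (A.2.1.2.2 : ZMod pvNN);
     (A.2.2.1 : ZMod pvNN), (A.2.2.2.1 : ZMod pvNN), (A.2.2.2.2 : ZMod pvNN)]

lemma pvCast_mod (a : Int) : ((PySem.Int.mod a pvMOD : Int) : ZMod pvNN) = (a : ZMod pvNN) := by
  rw [PySem.Int.mod_eq_emod_of_pos pvMOD_pos, pvMOD_eq_NN]
  exact_mod_cast ZMod.intCast_mod a pvNN

lemma pvCast_mul (A B : pvMat3) : pvCast (pvMul A B pvMOD) = pvCast A * pvCast B := by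
  obtain ⟨⟨a11, a12, a13⟩, ⟨a21, a22, a23⟩, ⟨a31, a32, a33⟩⟩ := A
  obtain ⟨⟨b11, b12, b13⟩, ⟨b21, b22, b23⟩, ⟨b31, b32, b33⟩⟩ := B
  simp only [pvMul, pvCast, Matrix.mul_fin_three, pvCast_mod]
  push_cast
  rfl

lemma pvPowLoop_cast (e : Nat) (R T : pvMat3) :
    pvCast (pvPowLoop e R T pvMOD) = pvCast R * (pvCast T) ^ e := by
  induction e using Nat.strong_induction_on generalizing R T with
  | _ e ih =>
    rw [pvPowLoop]
    by_cases h : e = 0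
    · simp [h]
    · simp only [h, dite_false]
      rw [ih (e / 2) (Nat.div_lt_self (Nat.pos_of_ne_zero h) (by omega))]
      rw [pvCast_mul]
      have hsq : (pvCast T * pvCast T) ^ (e / 2) = pvCast T ^ (2 * (e / 2)) := by
        rw [pow_mul, sq]
      by_cases hodd : e % 2 = 1
      · simp only [hodd, if_true]
        rw [pvCast_mul, hsq]
        have he : e = 2 * (e / 2) + 1 := by omega
        calc pvCast R * pvCast T * pvCast T ^ (2 * (e / 2))
            = pvCast R * (pvCast T * pvCast T ^ (2 * (e / 2))) := by rw [mul_assoc]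
          _ = pvCast R * pvCast T ^ (2 * (e / 2) + 1) := by rw [← pow_succ']
          _ = pvCast R * pvCast T ^ e := by rw [← he]
      · have heven : e % 2 = 0 := by omega
        simp only [hodd, if_false]
        rw [hsq]
        have he : 2 * (e / 2) = e := by omega
        rw [he]

def pvTz : Matrix (Fin 3) (Fin 3) (ZMod pvNN) := !![1, 1, 1; 1, 0, 0; 0, 1, 0]

lemma pvTz_pow_vec (e : Nat) :
    (pvTz ^ e).mulVec ![2, 1, 1] =
      ![((pvT (e + 2) : Int) : ZMod pvNN), ((pvT (e + 1) : Int) : ZMod pvNN),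
        ((pvT e : Int) : ZMod pvNN)] := by
  induction e with
  | zero =>
    funext i
    fin_cases i <;> simp [pvT, pow_zero, Matrix.one_mulVec]
  | succ e ih =>
    rw [pow_succ', ← Matrix.mulVec_mulVec, ih]
    funext i
    have hcast : ((pvT (e + 3) : Int) : ZMod pvNN) =
        ((pvT (e + 2) : Int) : ZMod pvNN) + ((pvT (e + 1) : Int) : ZMod pvNN) +
          ((pvT e : Int) : ZMod pvNN) := by
      show (((pvT (e + 2) + pvT (e + 1) + pvT e) % pvMOD : Int) : ZMod pvNN) = _
      rw [pvMOD_eq_NN, ZMod.intCast_mod (pvT (e + 2) + pvT (e + 1) + pvT e) pvNN]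
      push_cast
      ring
    fin_cases i <;>
      simp [pvTz, Matrix.mulVec, dotProduct, Fin.sum_univ_three, hcast]

lemma stepPermsAlt_eq_pvT (n : Int) (hn : 3 ≤ n) : stepPerms_alt n = pvT n.toNat := by
  unfold stepPerms_alt
  rw [if_neg (by omega)]
  rw [show (10 ^ 10 + 7 : Int) = pvMOD from rfl]
  set e := (n - 2).toNat with he
  set R := pvPowLoop e ((1, 0, 0), (0, 1, 0), (0, 0, 1)) ((1, 1, 1), (1, 0, 0), (0, 1, 0))
      pvMOD with hR
  have hRcast : pvCast R = pvTz ^ e := by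
    rw [hR, pvPowLoop_cast]
    have h1 : pvCast ((1, 0, 0), (0, 1, 0), (0, 0, 1)) = 1 := by
      simp [pvCast, Matrix.one_fin_three]
    have h2 : pvCast ((1, 1, 1), (1, 0, 0), (0, 1, 0)) = pvTz := by
      simp [pvCast, pvTz]
    rw [h1, h2, one_mul]
  have hrow : ((2 * R.1.1 + R.1.2.1 + R.1.2.2 : Int) : ZMod pvNN) =
      ((pvT (e + 2) : Int) : ZMod pvNN) := by
    have hv := pvTz_pow_vec e
    have h0 := congrFun hv 0
    rw [← hRcast] at h0
    have hlhs : (pvCast R).mulVec ![2, 1, 1] 0 =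
        ((2 * R.1.1 + R.1.2.1 + R.1.2.2 : Int) : ZMod pvNN) := by
      simp [pvCast, Matrix.mulVec, dotProduct, Fin.sum_univ_three]
      ring
    rw [hlhs] at h0
    simpa using h0
  have hen : e + 2 = n.toNat := by omega
  rw [hen] at hrow
  have hmodeq : (2 * R.1.1 + R.1.2.1 + R.1.2.2) % pvMOD = pvT n.toNat % pvMOD := by
    rw [pvMOD_eq_NN]
    exact_mod_cast (ZMod.intCast_eq_intCast_iff _ _ _).mp hrow
  rw [PySem.Int.mod_eq_emod_of_pos pvMOD_pos, hmodeq,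
    Int.emod_eq_of_lt (pvT_nonneg _) (pvT_lt _)]

-- ===== VERDICT (by name: the statement is the Claim_ definition above) =====
theorem stepPerms_spec : Claim_equal_stepPerms := by
  intro n _hdom hpre
  unfold Spec_stepPerms
  by_cases h3 : 3 ≤ n
  · rw [stepPerms_eq_pvT n h3, stepPermsAlt_eq_pvT n h3]
  · have h1 : -3 ≤ n := hpre
    have h2 : n ≤ 2 := by omega
    interval_cases n <;> decide
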